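-- pv_equiv track=rewrite | github.com/severinpolo/AoC24 | day22/solution_p2_slow.py | loop
-- ===== SOURCE A (Python) =====
-- def get_num(num):
--     num = (num ^ (num * 64)) % 16777216
--     num = (num ^ (num // 32)) % 16777216
--     num = (num ^ (num * 2048)) % 16777216
--     return num
--
-- def loop(num, times):
--     nums = []
--     changes = {}
--     for t in range(times):
--         num = get_num(num)
--         p = num % 10
--         nums.append(p)
--         if len(nums) == 5:
--             series = tuple(nums[i+1] - nums[i] for i in range(4))
--             if series not in changes:
--                 changes[series] = p
--             nums = nums[1:]
--
--     return changes
-- ===== SOURCE B (Python) =====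
-- def get_num(num):
--     num = (num ^ (num * 64)) % 16777216
--     num = (num ^ (num // 32)) % 16777216
--     num = (num ^ (num * 2048)) % 16777216
--     return num
--
-- def loop(num, times):
--     # pass 1: generate the whole price stream
--     prices = []
--     for _ in range(times):
--         num = get_num(num)
--         prices.append(num % 10)
--     # pass 2: scan 4-change windows in order of increasing end index
--     changes = {}
--     for i in range(len(prices) - 4):
--         series = tuple(prices[j + 1] - prices[j] for j in range(i, i + 4))
--         if series not in changes:
--             changes[series] = prices[i + 4]
--     return changes
-- ===== Notes on version B (the rewrite author's own statement) =====
-- stated objective: alternative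
-- what changed: B first materialises the whole price stream in one generation pass and then scans it with an index loop over 4-change windows, instead of A's interleaved sliding 5-element buffer rebuilt with a slice on every PRNG step.
import Mathlib
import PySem

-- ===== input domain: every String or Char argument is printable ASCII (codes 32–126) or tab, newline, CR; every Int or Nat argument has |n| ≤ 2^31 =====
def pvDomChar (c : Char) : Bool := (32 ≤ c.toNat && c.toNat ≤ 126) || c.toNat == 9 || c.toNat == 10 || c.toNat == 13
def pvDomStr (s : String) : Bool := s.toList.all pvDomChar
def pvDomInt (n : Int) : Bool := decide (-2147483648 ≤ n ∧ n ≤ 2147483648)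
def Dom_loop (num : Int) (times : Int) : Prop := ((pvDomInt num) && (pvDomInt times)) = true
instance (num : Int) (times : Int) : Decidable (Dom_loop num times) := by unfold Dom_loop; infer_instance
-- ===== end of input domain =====

-- B separates PRNG-stream generation from window analysis (two passes over an explicit
-- price list) instead of interleaving them with a sliding 5-element buffer; objective: alternative decomposition.

-- ===== PORT A =====
-- helper shared by both Pythons (each defines the identical get_num)
def getNum (num : Int) : Int :=
  let n1 := PySem.Int.mod (PySem.Int.bxor num (num * 64)) 16777216
  let n2 := PySem.Int.mod (PySem.Int.bxor n1 (PySem.Int.floordiv n1 32)) 16777216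
  PySem.Int.mod (PySem.Int.bxor n2 (n2 * 2048)) 16777216

def loopStepA (st : Int × List Int × PySem.Dict (List Int) Int) (_t : Int) :
    Int × List Int × PySem.Dict (List Int) Int :=
  let n := getNum st.1
  let p := PySem.Int.mod n 10
  let nums := st.2.1 ++ [p]
  if nums.length = 5 then
    let series := (PySem.List.pyRange 0 4 1).map
      (fun i => PySem.List.pyGetD nums (i + 1) 0 - PySem.List.pyGetD nums i 0)
    let changes := if st.2.2.contains series then st.2.2 else st.2.2.insert series p
    (n, PySem.List.slice nums (some 1) none, changes)
  else
    (n, nums, st.2.2)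

def loop (num : Int) (times : Int) : List (List Int × Int) :=
  ((PySem.List.pyRange 0 times 1).foldl loopStepA
    (num, ([], (PySem.Dict.empty : PySem.Dict (List Int) Int)))).2.2.items

-- ===== PORT B =====
def loop_alt (num : Int) (times : Int) : List (List Int × Int) :=
  let gen := (PySem.List.pyRange 0 times 1).foldl
    (fun st _ => let n := getNum st.1; (n, st.2 ++ [PySem.Int.mod n 10]))
    (num, ([] : List Int))
  let prices := gen.2
  let changes := (PySem.List.pyRange 0 (PySem.List.len prices - 4) 1).foldl
    (fun d i =>
      let series := (PySem.List.pyRange i (i + 4) 1).map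
        (fun j => PySem.List.pyGetD prices (j + 1) 0 - PySem.List.pyGetD prices j 0)
      if d.contains series then d else d.insert series (PySem.List.pyGetD prices (i + 4) 0))
    (PySem.Dict.empty : PySem.Dict (List Int) Int)
  changes.items

-- ===== PRECONDITION & SPEC =====
def Spec_loop (num : Int) (times : Int) (out : List (List Int × Int)) : Prop := out = loop_alt num times
instance (num : Int) (times : Int) (out : List (List Int × Int)) : Decidable (Spec_loop num times out) := by unfold Spec_loop; infer_instance

-- ===== CLAIM (what is proved, stated in full; the proofs are below) =====
def Claim_equal_loop : Prop := ∀ (num : Int) (times : Int), Dom_loop num times → Spec_loop num times (loop num times)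

-- ===== LEMMAS AND PROOFS =====

-- the k-th generated price (0-based): num advanced k+1 times, mod 10
def pvP (num0 : Int) (k : Nat) : Int := PySem.Int.mod (getNum^[k + 1] num0) 10

def pvPrices (num0 : Int) (n : Nat) : List Int := (List.range n).map (pvP num0)

def pvKey (num0 : Int) (i : Nat) : List Int :=
  (List.range 4).map (fun j => pvP num0 (i + j + 1) - pvP num0 (i + j))

def pvStep (num0 : Int) (d : PySem.Dict (List Int) Int) (i : Nat) : PySem.Dict (List Int) Int :=
  if d.contains (pvKey num0 i) then d else d.insert (pvKey num0 i) (pvP num0 (i + 4))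

def pvCh (num0 : Int) (n : Nat) : PySem.Dict (List Int) Int :=
  (List.range (n - 4)).foldl (pvStep num0) PySem.Dict.empty

theorem pvDropPrices (num0 : Int) (m k : Nat) :
    (pvPrices num0 m).drop k = (List.range (m - k)).map (fun j => pvP num0 (k + j)) := by
  unfold pvPrices
  rw [← List.map_drop, List.range_eq_range', List.drop_range', List.range'_eq_map_range]
  simp [List.map_map, Function.comp]

theorem pvA_inv (num0 : Int) (n : Nat) :
    (List.range n).foldl (fun st (_ : Nat) => loopStepA st 0)
      (num0, ([], (PySem.Dict.empty : PySem.Dict (List Int) Int)))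
    = (getNum^[n] num0, (pvPrices num0 n).drop (n - 4), pvCh num0 n) := by
  induction n with
  | zero => simp [pvPrices, pvCh]
  | succ n ih =>
    rw [List.range_succ, List.foldl_append, ih]
    simp only [List.foldl_cons, List.foldl_nil]
    rw [pvDropPrices]
    unfold loopStepA
    simp only [← Function.iterate_succ_apply']
    by_cases h4 : 4 ≤ n
    · -- the buffer reaches length 5: a window is recorded and the buffer is trimmed
      have e0 : n - (n - 4) = 4 := by omega
      have e1 : n - 4 + 1 = n - 3 := by omega
      have e2 : n - 4 + 2 = n - 2 := by omega
      have e3 : n - 4 + 3 = n - 1 := by omega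
      have e4 : n - 4 + 4 = n := by omega
      have hnums : (List.range (n - (n - 4))).map (fun j => pvP num0 (n - 4 + j))
          ++ [PySem.Int.mod (getNum^[n + 1] num0) 10]
          = [pvP num0 (n - 4), pvP num0 (n - 3), pvP num0 (n - 2), pvP num0 (n - 1), pvP num0 n] := by
        rw [e0, show PySem.Int.mod (getNum^[n + 1] num0) 10 = pvP num0 n from rfl]
        simp only [List.range_succ, List.range_zero, List.map_cons,
          List.map_nil, List.nil_append, List.cons_append, Nat.add_zero, e1, e2, e3]
      rw [hnums]
      have hr4 : PySem.List.pyRange 0 4 1 = [0, 1, 2, 3] := by decide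
      rw [hr4]
      have hser : ([0, 1, 2, 3] : List Int).map
          (fun i => PySem.List.pyGetD [pvP num0 (n - 4), pvP num0 (n - 3), pvP num0 (n - 2), pvP num0 (n - 1), pvP num0 n] (i + 1) 0
            - PySem.List.pyGetD [pvP num0 (n - 4), pvP num0 (n - 3), pvP num0 (n - 2), pvP num0 (n - 1), pvP num0 n] i 0)
          = pvKey num0 (n - 4) := by
        simp [pvKey, List.range_succ, PySem.List.pyGetD, PySem.List.pyGet?, PySem.List.pyIdx?, e1, e2, e3]
        refine ⟨congrArg (pvP num0) (by omega), congrArg (pvP num0) (by omega),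
          congrArg (pvP num0) (by omega)⟩
      have hch : pvCh num0 (n + 1)
          = if (pvCh num0 n).contains (pvKey num0 (n - 4)) then pvCh num0 n
            else (pvCh num0 n).insert (pvKey num0 (n - 4)) (pvP num0 n) := by
        have : n + 1 - 4 = (n - 4) + 1 := by omega
        rw [pvCh, this, List.range_succ, List.foldl_append]
        simp only [List.foldl_cons, List.foldl_nil]
        rw [← pvCh]
        simp [pvStep, e4]
      have hdrop1 : (pvPrices num0 (n + 1)).drop (n + 1 - 4)
          = [pvP num0 (n - 3), pvP num0 (n - 2), pvP num0 (n - 1), pvP num0 n] := by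
        rw [pvDropPrices]
        have : n + 1 - (n + 1 - 4) = 4 := by omega
        rw [this]
        have f1 : n + 1 - 4 = n - 3 := by omega
        have f2 : n - 3 + 1 = n - 2 := by omega
        have f3 : n - 3 + 2 = n - 1 := by omega
        have f4 : n - 3 + 3 = n := by omega
        simp [List.range_succ, f1, f2, f3, f4]
      simp only [List.length_cons, List.length_nil]
      simp only [if_true]
      refine Prod.ext rfl (Prod.ext ?_ ?_)
      · show PySem.List.slice _ (some 1) none = _
        rw [PySem.List.slice_from_one, hdrop1]
        rfl
      · show (if (pvCh num0 n).contains _ then _ else _) = pvCh num0 (n + 1)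
        rw [hser, hch]
        rfl
    · -- fewer than 5 prices so far: just append, nothing recorded
      have e0 : n - 4 = 0 := by omega
      have hlen : ¬ ((List.range (n - (n - 4))).map (fun j => pvP num0 (n - 4 + j))
          ++ [PySem.Int.mod (getNum^[n + 1] num0) 10]).length = 5 := by
        simp; omega
      rw [if_neg hlen]
      have hch : pvCh num0 (n + 1) = pvCh num0 n := by
        have : n + 1 - 4 = n - 4 := by omega
        rw [pvCh, this, ← pvCh]
      refine Prod.ext rfl (Prod.ext ?_ hch.symm)
      show (List.range (n - (n - 4))).map (fun j => pvP num0 (n - 4 + j))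
          ++ [PySem.Int.mod (getNum^[n + 1] num0) 10] = _
      have g1 : n + 1 - 4 = 0 := by omega
      rw [pvDropPrices, g1, e0]
      simp only [Nat.sub_zero]
      rw [List.range_succ, List.map_append]
      simp only [List.map_cons, List.map_nil, Nat.zero_add]
      rfl

theorem loop_eq (num0 times : Int) : loop num0 times = (pvCh num0 times.toNat).items := by
  unfold loop
  rw [PySem.List.pyRange_one, List.foldl_map]
  rw [show times - 0 = times from by ring]
  exact congrArg (fun st => st.2.2.items) (pvA_inv num0 times.toNat)

theorem pvGetP (num0 : Int) (n m : Nat) (h : m < n) :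
    PySem.List.pyGetD (pvPrices num0 n) ((m : Nat) : Int) 0 = pvP num0 m := by
  rw [PySem.List.pyGetD_natCast]
  simp [pvPrices, List.getD_eq_getElem?_getD, h]

theorem pvB_gen (num0 : Int) (t : Int) :
    (PySem.List.pyRange 0 t 1).foldl
      (fun st (_ : Int) => (getNum st.1, st.2 ++ [PySem.Int.mod (getNum st.1) 10]))
      (num0, ([] : List Int))
    = (getNum^[t.toNat] num0, pvPrices num0 t.toNat) := by
  rw [PySem.List.pyRange_one, List.foldl_map]
  rw [show t - 0 = t from by ring]
  induction t.toNat with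
  | zero => simp [pvPrices]
  | succ n ih =>
    rw [List.range_succ, List.foldl_append, ih]
    simp only [List.foldl_cons, List.foldl_nil]
    rw [show pvPrices num0 (n + 1) = pvPrices num0 n ++ [pvP num0 n] from by
      simp [pvPrices, List.range_succ]]
    rw [← Function.iterate_succ_apply' getNum]
    rfl

theorem pvB_scan (num0 : Int) (n : Nat) :
    (PySem.List.pyRange 0 (PySem.List.len (pvPrices num0 n) - 4) 1).foldl
      (fun d i =>
        let series := (PySem.List.pyRange i (i + 4) 1).map
          (fun j => PySem.List.pyGetD (pvPrices num0 n) (j + 1) 0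
            - PySem.List.pyGetD (pvPrices num0 n) j 0)
        if d.contains series then d
        else d.insert series (PySem.List.pyGetD (pvPrices num0 n) (i + 4) 0))
      (PySem.Dict.empty : PySem.Dict (List Int) Int)
    = pvCh num0 n := by
  have hlen : PySem.List.len (pvPrices num0 n) = (n : Int) := by
    simp [pvPrices]
  rw [hlen, PySem.List.pyRange_one, List.foldl_map]
  have htn : ((n : Int) - 4 - 0).toNat = n - 4 := by omega
  rw [htn]
  unfold pvCh
  refine PySem.List.foldl_congr_mem _ _ _ _ ?_
  intro d k hk
  have hk4 : k < n - 4 := List.mem_range.mp hk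
  have hser : (PySem.List.pyRange (0 + (k : Int)) (0 + (k : Int) + 4) 1).map
      (fun j => PySem.List.pyGetD (pvPrices num0 n) (j + 1) 0
        - PySem.List.pyGetD (pvPrices num0 n) j 0) = pvKey num0 k := by
    rw [show (0 + (k : Int)) = ((k : Nat) : Int) from by ring]
    rw [PySem.List.pyRange_one, show (((k : Nat) : Int) + 4 - ((k : Nat) : Int)).toNat = 4 from by omega,
      List.map_map]
    unfold pvKey
    refine List.map_congr_left ?_
    intro j hj
    have hj4 : j < 4 := List.mem_range.mp hj
    show PySem.List.pyGetD (pvPrices num0 n) (((k : Nat) : Int) + (j : Nat) + 1) 0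
        - PySem.List.pyGetD (pvPrices num0 n) (((k : Nat) : Int) + (j : Nat)) 0
      = pvP num0 (k + j + 1) - pvP num0 (k + j)
    rw [show ((k : Nat) : Int) + (j : Nat) + 1 = (((k + j + 1 : Nat)) : Int) from by push_cast; ring,
      show ((k : Nat) : Int) + (j : Nat) = (((k + j : Nat)) : Int) from by push_cast; ring,
      pvGetP num0 n (k + j + 1) (by omega), pvGetP num0 n (k + j) (by omega)]
  have hval : PySem.List.pyGetD (pvPrices num0 n) (0 + (k : Int) + 4) 0 = pvP num0 (k + 4) := by
    rw [show (0 + (k : Int) + 4) = (((k + 4 : Nat)) : Int) from by push_cast; ring,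
      pvGetP num0 n (k + 4) (by omega)]
  simp only [hser, hval, pvStep]

theorem loop_alt_eq (num0 times : Int) : loop_alt num0 times = (pvCh num0 times.toNat).items := by
  simp only [loop_alt]
  rw [show ((PySem.List.pyRange 0 times 1).foldl
      (fun st (_ : Int) => (getNum st.1, st.2 ++ [PySem.Int.mod (getNum st.1) 10]))
      (num0, ([] : List Int)))
    = (getNum^[times.toNat] num0, pvPrices num0 times.toNat) from pvB_gen num0 times]
  rw [pvB_scan]

-- ===== VERDICT (by name: the statement is the Claim_ definition above) =====
theorem loop_spec : Claim_equal_loop := by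
  intro num times _
  unfold Spec_loop
  rw [loop_eq, loop_alt_eq]
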